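-- pv_equiv track=rewrite | github.com/lara20000113/usenix2026 | Algorithm.py | LDSParse
-- ===== SOURCE A (Python) =====
-- def LDSParse(string):  # 只分析LDS结构
--     string += '\n'
--     tmpIndex = 0
--     dList = []
--     lList = []
--     sList = []
--     dString = ""
--     lString = ""
--     sString = ""
--     template = []
--     while string[tmpIndex] != '\n':
--         if string[tmpIndex].isdigit():
--             while string[tmpIndex].isdigit():
--                 dString += string[tmpIndex]
--                 tmpIndex += 1
--             dList.append(dString)
--             template.append('D.' + str(len(dString)))
--             dString = ""
--         elif string[tmpIndex].islower() or string[tmpIndex].isupper():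
--             while string[tmpIndex].islower() or string[tmpIndex].isupper():
--                 lString += string[tmpIndex]
--                 tmpIndex += 1
--             lList.append(lString)
--             template.append('L.' + str(len(lString)))
--             lString = ""
--         else:
--             while not (string[tmpIndex].isupper() or string[tmpIndex].islower() or string[tmpIndex].isdigit() or
--                        string[tmpIndex] == '\n'):
--                 sString += string[tmpIndex]
--                 tmpIndex += 1
--             sList.append(sString)
--             template.append('S.' + str(len(sString)))
--             sString = ""
--     return dList, lList, sList, template
-- ===== SOURCE B (Python) =====
-- def LDSParse(string):
--     # single pass: classify each char, grow the current run, flush on class change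
--     runs = []
--     prev, cur = '', ''
--     for c in string:
--         if c == '\n':
--             break
--         k = 'D' if c.isdigit() else 'L' if c.islower() or c.isupper() else 'S'
--         if cur and k != prev:
--             runs.append((prev, cur))
--             cur = ''
--         cur += c
--         prev = k
--     if cur:
--         runs.append((prev, cur))
--     dList = [sub for k, sub in runs if k == 'D']
--     lList = [sub for k, sub in runs if k == 'L']
--     sList = [sub for k, sub in runs if k == 'S']
--     template = [k + '.' + str(len(sub)) for k, sub in runs]
--     return dList, lList, sList, template
-- ===== Notes on version B (the rewrite author's own statement) =====
-- stated objective: faster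
-- what changed: A's newline-sentinel append and index-driven nested while loops are replaced by a single for-loop state machine that classifies each character once, collects (label, run) pairs, and derives the three class lists and the template from that run list by comprehensions.
import Mathlib
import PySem

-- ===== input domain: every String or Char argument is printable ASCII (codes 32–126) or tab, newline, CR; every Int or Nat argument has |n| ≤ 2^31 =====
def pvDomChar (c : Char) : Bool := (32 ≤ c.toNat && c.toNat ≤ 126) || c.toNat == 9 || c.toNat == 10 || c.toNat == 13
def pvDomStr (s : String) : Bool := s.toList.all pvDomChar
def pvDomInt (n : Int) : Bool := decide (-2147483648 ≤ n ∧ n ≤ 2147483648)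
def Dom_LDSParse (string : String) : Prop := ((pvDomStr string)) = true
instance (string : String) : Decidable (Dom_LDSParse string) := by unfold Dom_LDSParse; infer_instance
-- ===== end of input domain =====

-- B replaces A's sentinel-and-index nested-while scan by a single state-machine pass that
-- collects (label, run) pairs and derives the four outputs from that run list
-- (objective: faster by a constant-factor mechanism, measured).

-- ===== PORT A =====
-- A's inner 'while <cond>: acc += string[tmpIndex]; tmpIndex += 1' loops, one shared shape:
-- walks the remaining characters while p holds, returning (accumulated run, rest).
def pyRunA (p : Char → Bool) : List Char → List Char → List Char × List Char
  | [], acc => (acc, [])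
  | c :: cs, acc => if p c then pyRunA p cs (acc ++ [c]) else (acc, c :: cs)

theorem pyRunA_eq (p : Char → Bool) : ∀ (cs acc : List Char),
    pyRunA p cs acc = (acc ++ cs.takeWhile p, cs.dropWhile p) := by
  intro cs
  induction cs with
  | nil => intro acc; simp [pyRunA]
  | cons c cs ih =>
    intro acc
    by_cases h : p c = true <;> simp [pyRunA, h, ih]

-- A's outer 'while string[tmpIndex] != '\n'' loop over the remaining characters
-- (the appended '\n' guarantees the loop stops; the [] case is an unreachable totality guard).
def LDSParseLoop : List Char → List String → List String → List String → List String →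
    List String × List String × List String × List String
  | [], d, l, s, t => (d, l, s, t)
  | c :: cs, d, l, s, t =>
    if c = '\n' then (d, l, s, t)
    else if hD : PySem.Chars.isdigit c then
      let pr := pyRunA PySem.Chars.isdigit (c :: cs) []
      LDSParseLoop pr.2 (d ++ [String.ofList pr.1]) l s
        (t ++ ["D." ++ PySem.Int.toStr (pr.1.length : Int)])
    else if hL : PySem.Chars.islower c || PySem.Chars.isupper c then
      let pr := pyRunA (fun x => PySem.Chars.islower x || PySem.Chars.isupper x) (c :: cs) []
      LDSParseLoop pr.2 d (l ++ [String.ofList pr.1]) s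
        (t ++ ["L." ++ PySem.Int.toStr (pr.1.length : Int)])
    else
      let pr := pyRunA (fun x => !(PySem.Chars.isupper x || PySem.Chars.islower x ||
        PySem.Chars.isdigit x || x = '\n')) (c :: cs) []
      LDSParseLoop pr.2 d l (s ++ [String.ofList pr.1])
        (t ++ ["S." ++ PySem.Int.toStr (pr.1.length : Int)])
  termination_by cs _ _ _ _ => cs.length
  decreasing_by
  · simp only [pyRunA, hD, if_pos]
    rw [pyRunA_eq]
    simpa using Nat.lt_succ_of_le (List.length_dropWhile_le _ cs)
  · simp only [pyRunA, hL, if_pos]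
    rw [pyRunA_eq]
    simpa using Nat.lt_succ_of_le (List.length_dropWhile_le _ cs)
  · have hS : (!(PySem.Chars.isupper c || PySem.Chars.islower c ||
        PySem.Chars.isdigit c || c = '\n')) = true := by
      simp only [Bool.not_eq_true', Bool.or_eq_true, not_or] at hD hL ⊢
      simp [hD, hL.1, hL.2, *]
    simp only [pyRunA, hS, if_pos]
    rw [pyRunA_eq]
    simpa using Nat.lt_succ_of_le (List.length_dropWhile_le _ cs)

def LDSParse (string : String) : List String × List String × List String × List String :=
  LDSParseLoop (string.toList ++ ['\n']) [] [] [] []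

-- ===== PORT B =====
-- classifier: 'D' if c.isdigit() else 'L' if c.islower() or c.isupper() else 'S'
def clsB (c : Char) : Char :=
  if PySem.Chars.isdigit c then 'D'
  else if PySem.Chars.islower c || PySem.Chars.isupper c then 'L'
  else 'S'

-- one loop iteration: flush the current run on a class change, then extend it
def stepB (st : List (Char × List Char) × Char × List Char) (c : Char) :
    List (Char × List Char) × Char × List Char :=
  let k := clsB c
  if st.2.2 ≠ [] ∧ k ≠ st.2.1 then (st.1 ++ [(st.2.1, st.2.2)], k, [c])
  else (st.1, k, st.2.2 ++ [c])

-- the 'for c in string: if c == '\n': break; …' loop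
def loopB : List Char → (List (Char × List Char) × Char × List Char) →
    List (Char × List Char) × Char × List Char
  | [], st => st
  | c :: cs, st => if c = '\n' then st else loopB cs (stepB st c)

-- the final 'if cur: runs.append((prev, cur))'
def flushB (st : List (Char × List Char) × Char × List Char) : List (Char × List Char) :=
  if st.2.2 ≠ [] then st.1 ++ [(st.2.1, st.2.2)] else st.1

def LDSParse_alt (string : String) : List String × List String × List String × List String :=
  -- initial prev is ' ' for Python's '': its value is irrelevant while cur is empty
  let runs := flushB (loopB string.toList ([], ' ', []))
  ((runs.filter (fun r => r.1 = 'D')).map (fun r => String.ofList r.2),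
   (runs.filter (fun r => r.1 = 'L')).map (fun r => String.ofList r.2),
   (runs.filter (fun r => r.1 = 'S')).map (fun r => String.ofList r.2),
   runs.map (fun r => String.ofList [r.1] ++ "." ++ PySem.Int.toStr (r.2.length : Int)))

-- ===== PRECONDITION & SPEC =====
def Spec_LDSParse (string : String) (out : List String × List String × List String × List String) : Prop := out = LDSParse_alt string
instance (string : String) (out : List String × List String × List String × List String) : Decidable (Spec_LDSParse string out) := by unfold Spec_LDSParse; infer_instance

-- ===== CLAIM (what is proved, stated in full; the proofs are below) =====
def Claim_equal_LDSParse : Prop := ∀ (string : String), Dom_LDSParse string → Spec_LDSParse string (LDSParse string)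

-- ===== LEMMAS AND PROOFS =====

-- the common semantics both ports are reduced to: the maximal same-class runs of a list
def runsOf : List Char → List (Char × List Char)
  | [] => []
  | c :: cs =>
    let pr := cs.span (fun x => clsB x = clsB c)
    (clsB c, c :: pr.1) :: runsOf pr.2
  termination_by cs => cs.length
  decreasing_by
    simp only [List.span_eq_takeWhile_dropWhile]
    exact Nat.lt_succ_of_le (List.length_dropWhile_le _ cs)

def buildOut (R : List (Char × List Char)) :
    List String × List String × List String × List String :=
  ((R.filter (fun r => r.1 = 'D')).map (fun r => String.ofList r.2),
   (R.filter (fun r => r.1 = 'L')).map (fun r => String.ofList r.2),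
   (R.filter (fun r => r.1 = 'S')).map (fun r => String.ofList r.2),
   R.map (fun r => String.ofList [r.1] ++ "." ++ PySem.Int.toStr (r.2.length : Int)))

def qnl (a : Char) : Bool := !(decide (a = '\n'))

theorem span_trunc (k : Char) (pA : Char → Bool)
    (h1 : ∀ a, qnl a = true → (decide (clsB a = k)) = pA a)
    (h2 : ∀ a, pA a = true → qnl a = true) :
    ∀ l : List Char,
      (l.takeWhile qnl).takeWhile (fun x => decide (clsB x = k)) = l.takeWhile pA ∧
      (l.takeWhile qnl).dropWhile (fun x => decide (clsB x = k)) =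
        (l.dropWhile pA).takeWhile qnl := by
  intro l
  induction l with
  | nil => simp
  | cons a l ih =>
    by_cases hq : qnl a = true
    · have hcl : (decide (clsB a = k)) = pA a := h1 a hq
      by_cases hp : pA a = true
      · simp [List.takeWhile_cons, List.dropWhile_cons, hq, hcl, hp, ih.1, ih.2]
      · simp only [Bool.not_eq_true] at hp
        simp [List.takeWhile_cons, List.dropWhile_cons, hq, hcl, hp]
    · have hp : pA a = false := by
        by_contra h
        simp only [Bool.not_eq_false] at h
        exact hq (h2 a h)
      simp only [Bool.not_eq_true] at hq
      simp [List.takeWhile_cons, List.dropWhile_cons, hq, hp]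

theorem runsOf_cons (c : Char) (cs : List Char) :
    runsOf (c :: cs) =
      (clsB c, c :: cs.takeWhile (fun x => decide (clsB x = clsB c))) ::
        runsOf (cs.dropWhile (fun x => decide (clsB x = clsB c))) := by
  rw [runsOf]
  simp [List.span_eq_takeWhile_dropWhile]

theorem runsOf_branch (c : Char) (cs : List Char) (pA : Char → Bool)
    (h1 : ∀ a, qnl a = true → (decide (clsB a = clsB c)) = pA a)
    (h2 : ∀ a, pA a = true → qnl a = true)
    (hc : pA c = true) :
    runsOf ((c :: cs).takeWhile qnl) =
      (clsB c, (c :: cs).takeWhile pA) ::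
        runsOf (((c :: cs).dropWhile pA).takeWhile qnl) := by
  have hq : qnl c = true := h2 c hc
  have hst := span_trunc (clsB c) pA h1 h2 cs
  simp only [List.takeWhile_cons, List.dropWhile_cons, hq, hc, if_pos]
  rw [runsOf_cons, hst.1, hst.2]

-- ASCII class ranges as numbers, for the disjointness facts below
theorem charvals : ('0':Char).val.toNat = 48 ∧ ('9':Char).val.toNat = 57 ∧
    ('a':Char).val.toNat = 97 ∧ ('z':Char).val.toNat = 122 ∧
    ('A':Char).val.toNat = 65 ∧ ('Z':Char).val.toNat = 90 := by decide

theorem digit_not_letter (a : Char) (h : PySem.Chars.isdigit a = true) :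
    (PySem.Chars.islower a || PySem.Chars.isupper a) = false := by
  simp only [PySem.Chars.isdigit, PySem.Chars.islower, PySem.Chars.isupper,
    Bool.and_eq_true, decide_eq_true_eq, Char.le_def, UInt32.le_iff_toNat_le] at h ⊢
  simp only [Bool.or_eq_false_iff, Bool.and_eq_false_iff, decide_eq_false_iff_not,
    Char.le_def, UInt32.le_iff_toNat_le, not_le]
  have := charvals
  omega

theorem qnl_of_digit (a : Char) (h : PySem.Chars.isdigit a = true) : qnl a = true := by
  by_cases e : a = '\n'
  · subst e; exact absurd h (by decide)
  · simp [qnl, e]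

theorem qnl_of_letter (a : Char)
    (h : (PySem.Chars.islower a || PySem.Chars.isupper a) = true) : qnl a = true := by
  by_cases e : a = '\n'
  · subst e; exact absurd h (by decide)
  · simp [qnl, e]

theorem cls_eq_D (a : Char) : (decide (clsB a = 'D')) = PySem.Chars.isdigit a := by
  unfold clsB
  split_ifs with h1 h2
  · simp [h1]
  · simp [h1]
  · simp [h1]

theorem cls_eq_L (a : Char) :
    (decide (clsB a = 'L')) = (PySem.Chars.islower a || PySem.Chars.isupper a) := by
  unfold clsB
  split_ifs with h1 h2
  · simp [digit_not_letter a h1]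
  · simp [h2]
  · simp [h2]

theorem cls_eq_S (a : Char) :
    (decide (clsB a = 'S')) =
      (!(PySem.Chars.isdigit a || PySem.Chars.islower a || PySem.Chars.isupper a)) := by
  unfold clsB
  split_ifs with h1 h2
  · simp [h1]
  · rcases Bool.or_eq_true_iff.mp h2 with h | h <;> simp [h1, h]
  · simp only [Bool.or_eq_true, not_or, Bool.not_eq_true] at h2
    simp [h1, h2.1, h2.2]

-- the symbol-branch loop predicate of A, rewritten through qnl
theorem symb_pred (a : Char) :
    (!(PySem.Chars.isupper a || PySem.Chars.islower a ||
        PySem.Chars.isdigit a || decide (a = '\n'))) =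
      ((decide (clsB a = 'S')) && qnl a) := by
  rw [cls_eq_S]
  simp only [qnl]
  by_cases h1 : PySem.Chars.isupper a <;> by_cases h2 : PySem.Chars.islower a <;>
    by_cases h3 : PySem.Chars.isdigit a <;> by_cases h4 : a = '\n' <;> simp [h1, h2, h3, h4]

theorem lbl_dot (k : Char) : (String.ofList [k] ++ "." : String) = String.ofList [k, '.'] := by
  have h : ("." : String) = String.ofList ['.'] := rfl
  rw [h, ← String.ofList_append]
  simp

theorem buildOut_cons_D (run : List Char) (R : List (Char × List Char)) :
    buildOut (('D', run) :: R) =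
      (String.ofList run :: (buildOut R).1, (buildOut R).2.1, (buildOut R).2.2.1,
       ("D." ++ PySem.Int.toStr (run.length : Int)) :: (buildOut R).2.2.2) := by
  simp [buildOut, List.filter_cons, lbl_dot]

theorem buildOut_cons_L (run : List Char) (R : List (Char × List Char)) :
    buildOut (('L', run) :: R) =
      ((buildOut R).1, String.ofList run :: (buildOut R).2.1, (buildOut R).2.2.1,
       ("L." ++ PySem.Int.toStr (run.length : Int)) :: (buildOut R).2.2.2) := by
  simp [buildOut, List.filter_cons, lbl_dot]

theorem buildOut_cons_S (run : List Char) (R : List (Char × List Char)) :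
    buildOut (('S', run) :: R) =
      ((buildOut R).1, (buildOut R).2.1, String.ofList run :: (buildOut R).2.2.1,
       ("S." ++ PySem.Int.toStr (run.length : Int)) :: (buildOut R).2.2.2) := by
  simp [buildOut, List.filter_cons, lbl_dot]

-- ── A's loop produces buildOut ∘ runsOf of the prefix before the first newline ──
theorem loopA_eq : ∀ (n : Nat) (cs : List Char), cs.length ≤ n → ∀ d l s t,
    LDSParseLoop cs d l s t =
      (d ++ (buildOut (runsOf (cs.takeWhile qnl))).1,
       l ++ (buildOut (runsOf (cs.takeWhile qnl))).2.1,
       s ++ (buildOut (runsOf (cs.takeWhile qnl))).2.2.1,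
       t ++ (buildOut (runsOf (cs.takeWhile qnl))).2.2.2) := by
  intro n
  induction n with
  | zero =>
    intro cs h
    have hnil : cs = [] := List.eq_nil_of_length_eq_zero (Nat.le_zero.mp h)
    subst hnil
    intro d l s t
    simp [LDSParseLoop, runsOf, buildOut]
  | succ n ih =>
    intro cs hlen d l s t
    match cs with
    | [] => simp [LDSParseLoop, runsOf, buildOut]
    | c :: cs =>
      by_cases hnl : c = '\n'
      · subst hnl
        have hq : qnl '\n' = false := by decide
        simp [LDSParseLoop, List.takeWhile_cons, hq, runsOf, buildOut]
      · have hlen' : cs.length ≤ n := by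
          simpa using Nat.succ_le_succ_iff.mp hlen
        by_cases hD : PySem.Chars.isdigit c = true
        · -- digit branch
          have hc : clsB c = 'D' := by
            have h := cls_eq_D c
            rw [hD] at h
            exact of_decide_eq_true h
          have hbr := runsOf_branch c cs PySem.Chars.isdigit
            (fun a _ => by rw [hc]; exact cls_eq_D a) qnl_of_digit hD
          have hlen2 : ((c :: cs).dropWhile PySem.Chars.isdigit).length ≤ n := by
            have hstep : (c :: cs).dropWhile PySem.Chars.isdigit =
                cs.dropWhile PySem.Chars.isdigit := by
              simp [List.dropWhile_cons, hD]
            rw [hstep]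
            exact le_trans (List.length_dropWhile_le _ _) hlen'
          simp only [LDSParseLoop, hnl, hD, if_neg, dif_pos, if_false, pyRunA_eq,
            List.nil_append]
          rw [ih _ hlen2, hbr, hc, buildOut_cons_D]
          simp [List.append_assoc]
        · by_cases hL : (PySem.Chars.islower c || PySem.Chars.isupper c) = true
          · -- letter branch
            have hc : clsB c = 'L' := by
              have h := cls_eq_L c
              rw [hL] at h
              exact of_decide_eq_true h
            have hbr := runsOf_branch c cs
              (fun x => PySem.Chars.islower x || PySem.Chars.isupper x)
              (fun a _ => by rw [hc]; exact cls_eq_L a) qnl_of_letter hL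
            have hlen2 : ((c :: cs).dropWhile
                (fun x => PySem.Chars.islower x || PySem.Chars.isupper x)).length ≤ n := by
              have hstep : (c :: cs).dropWhile
                  (fun x => PySem.Chars.islower x || PySem.Chars.isupper x) =
                  cs.dropWhile (fun x => PySem.Chars.islower x || PySem.Chars.isupper x) := by
                simp [List.dropWhile_cons, hL]
              rw [hstep]
              exact le_trans (List.length_dropWhile_le _ _) hlen'
            simp only [LDSParseLoop, hnl, hD, hL, if_neg, dif_neg, dif_pos, if_false,
              pyRunA_eq, List.nil_append]
            rw [ih _ hlen2, hbr, hc, buildOut_cons_L]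
            simp [List.append_assoc]
          · -- symbol branch
            have hc : clsB c = 'S' := by
              simp only [Bool.or_eq_true, not_or, Bool.not_eq_true] at hD hL
              simp [clsB, hD, hL.1, hL.2]
            have hSc : (!(PySem.Chars.isupper c || PySem.Chars.islower c ||
                PySem.Chars.isdigit c || decide (c = '\n'))) = true := by
              simp only [Bool.or_eq_true, not_or, Bool.not_eq_true] at hD hL
              simp [hD, hL.1, hL.2, hnl]
            have h1 : ∀ a, qnl a = true →
                (decide (clsB a = clsB c)) =
                  (!(PySem.Chars.isupper a || PySem.Chars.islower a ||
                     PySem.Chars.isdigit a || decide (a = '\n'))) := by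
              intro a ha
              rw [hc, symb_pred a, ha, Bool.and_true]
            have h2 : ∀ a, (!(PySem.Chars.isupper a || PySem.Chars.islower a ||
                PySem.Chars.isdigit a || decide (a = '\n'))) = true → qnl a = true := by
              intro a ha
              simp only [Bool.not_eq_true', Bool.or_eq_false_iff,
                decide_eq_false_iff_not] at ha
              simp [qnl, ha.2]
            have hbr := runsOf_branch c cs
              (fun x => !(PySem.Chars.isupper x || PySem.Chars.islower x ||
                PySem.Chars.isdigit x || decide (x = '\n'))) h1 h2 hSc
            have hlen2 : ((c :: cs).dropWhile
                (fun x => !(PySem.Chars.isupper x || PySem.Chars.islower x ||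
                  PySem.Chars.isdigit x || decide (x = '\n')))).length ≤ n := by
              have hstep : (c :: cs).dropWhile
                  (fun x => !(PySem.Chars.isupper x || PySem.Chars.islower x ||
                    PySem.Chars.isdigit x || decide (x = '\n'))) =
                  cs.dropWhile (fun x => !(PySem.Chars.isupper x || PySem.Chars.islower x ||
                    PySem.Chars.isdigit x || decide (x = '\n'))) := by
                simp only [List.dropWhile_cons, hSc, if_true]
              rw [hstep]
              exact le_trans (List.length_dropWhile_le _ _) hlen'
            simp only [LDSParseLoop, hnl, hD, hL, if_neg, dif_neg, if_false,
              pyRunA_eq, List.nil_append]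
            rw [ih _ hlen2, hbr, hc, buildOut_cons_S]
            simp [List.append_assoc]

-- ── B's loop also produces runsOf of the prefix before the first newline ──
theorem loopB_eq_fold : ∀ (cs : List Char) (st : List (Char × List Char) × Char × List Char),
    loopB cs st = (cs.takeWhile qnl).foldl stepB st := by
  intro cs
  induction cs with
  | nil => intro st; rfl
  | cons c cs ih =>
    intro st
    by_cases h : c = '\n'
    · subst h
      have hq : qnl '\n' = false := by decide
      simp [loopB, List.takeWhile_cons, hq]
    · have hq : qnl c = true := by simp [qnl, h]
      simp [loopB, List.takeWhile_cons, hq, h, ih]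

theorem foldl_open : ∀ (cs : List Char) (runs : List (Char × List Char)) (k : Char)
    (cur : List Char), cur ≠ [] →
    flushB (cs.foldl stepB (runs, k, cur)) =
      runs ++ (k, cur ++ cs.takeWhile (fun x => decide (clsB x = k))) ::
        runsOf (cs.dropWhile (fun x => decide (clsB x = k))) := by
  intro cs
  induction cs with
  | nil =>
    intro runs k cur hcur
    simp [flushB, hcur, runsOf]
  | cons c cs ih =>
    intro runs k cur hcur
    by_cases hk : clsB c = k
    · have hstep : stepB (runs, k, cur) c = (runs, k, cur ++ [c]) := by
        simp [stepB, hk]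
      simp only [List.foldl_cons, hstep]
      rw [ih runs k (cur ++ [c]) (by simp)]
      simp [List.takeWhile_cons, List.dropWhile_cons, hk, List.append_assoc]
    · have hstep : stepB (runs, k, cur) c = (runs ++ [(k, cur)], clsB c, [c]) := by
        simp [stepB, hcur, hk]
      simp only [List.foldl_cons, hstep]
      rw [ih (runs ++ [(k, cur)]) (clsB c) [c] (by simp)]
      have hq : (decide (clsB c = k)) = false := by simp [hk]
      simp [List.takeWhile_cons, List.dropWhile_cons, hq, runsOf_cons, List.append_assoc]

theorem foldl_closed : ∀ l : List Char, flushB (l.foldl stepB ([], ' ', [])) = runsOf l := by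
  intro l
  match l with
  | [] => simp [flushB, runsOf]
  | c :: cs =>
    have hstep : stepB ([], ' ', []) c = ([], clsB c, [c]) := by simp [stepB]
    simp only [List.foldl_cons, hstep]
    rw [foldl_open cs [] (clsB c) [c] (by simp)]
    simp [runsOf_cons]

theorem altB_eq (s : String) : LDSParse_alt s = buildOut (runsOf (s.toList.takeWhile qnl)) := by
  unfold LDSParse_alt buildOut
  rw [loopB_eq_fold, foldl_closed]

theorem takeWhile_append_nl : ∀ l : List Char,
    ((l ++ ['\n']).takeWhile qnl) = l.takeWhile qnl := by
  intro l
  induction l with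
  | nil => rfl
  | cons c cs ih =>
    by_cases h : c = '\n'
    · subst h
      have hq : qnl '\n' = false := by decide
      simp [List.takeWhile_cons, hq]
    · have hq : qnl c = true := by simp [qnl, h]
      simp [List.takeWhile_cons, hq, ih]

theorem altA_eq (s : String) : LDSParse s = buildOut (runsOf (s.toList.takeWhile qnl)) := by
  unfold LDSParse
  rw [loopA_eq (s.toList ++ ['\n']).length _ le_rfl, takeWhile_append_nl]
  simp

theorem LDSParse_spec : Claim_equal_LDSParse := by
  intro s _
  show LDSParse s = LDSParse_alt s
  rw [altA_eq, altB_eq]
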